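-- pv_equiv track=rewrite | github.com/kergene/advent-code | 2018/code_day_14.py | recipes_needed
-- ===== SOURCE A (Python) =====
-- def recipes_needed(data):
--     data = list(int(i) for i in str(data))
--     n = len(data)
--     current_a = 0
--     current_b = 1
--     board = [3, 7]
--     board_len = 2
--     check_idx = 0
--     while True:
--         new = board[current_a] + board[current_b]
--         for digit in str(new):
--             board.append(int(digit))
--             board_len += 1
--         current_a += board[current_a] + 1
--         current_a %= board_len
--         current_b += board[current_b] + 1
--         current_b %= board_len
--         while check_idx + n <= board_len:
--             if board[check_idx:check_idx + n] == data:
--                 return check_idx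
--             else:
--                 check_idx += 1
-- ===== SOURCE B (Python) =====
-- def recipes_needed(data):
--     # Rabin-Karp-style streaming search: instead of re-reading n-element board
--     # windows, keep the last n digits as one integer 'rolling' modulo 10**n and
--     # compare it with the pattern value directly (exact, since an n-digit window
--     # is determined by its value).
--     n = len(str(data))
--     mod = 10 ** n
--     board = []
--     a, b = 0, 1
--     count = 0
--     rolling = 0
--     # feed the two starting recipes through the rolling window
--     for d in (3, 7):
--         board.append(d)
--         rolling = (rolling * 10 + d) % mod
--         count += 1
--         if count >= n and rolling == data:
--             return count - n
--     while True:
--         s = board[a] + board[b]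
--         for d in ((1, s - 10) if s >= 10 else (s,)):
--             board.append(d)
--             rolling = (rolling * 10 + d) % mod
--             count += 1
--             if count >= n and rolling == data:
--                 return count - n
--         a = (a + board[a] + 1) % len(board)
--         b = (b + board[b] + 1) % len(board)
-- ===== Notes on version B (the rewrite author's own statement) =====
-- stated objective: alternative
-- what changed: Replaces A's check_idx window scan (an n-element list-slice comparison per candidate position) with a streaming exact Rabin-Karp matcher: the last n digits are kept as one integer modulo 10**n and every appended digit is checked with a single arithmetic comparison; new-recipe digits are split off arithmetically instead of via str(); the elf simulation is kept.
import Mathlib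
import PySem

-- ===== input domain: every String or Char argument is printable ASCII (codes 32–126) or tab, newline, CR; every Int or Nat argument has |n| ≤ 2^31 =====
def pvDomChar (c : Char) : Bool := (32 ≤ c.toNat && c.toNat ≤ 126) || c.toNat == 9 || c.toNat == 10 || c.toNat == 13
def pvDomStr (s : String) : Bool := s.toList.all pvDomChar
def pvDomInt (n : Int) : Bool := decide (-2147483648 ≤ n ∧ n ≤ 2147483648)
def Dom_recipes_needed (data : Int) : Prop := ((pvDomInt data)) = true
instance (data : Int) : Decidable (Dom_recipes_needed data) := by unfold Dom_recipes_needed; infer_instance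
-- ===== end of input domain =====

-- B replaces A's repeated n-element window slicing with a streaming exact Rabin-Karp
-- matcher (last n digits kept as one integer modulo 10^n); the elf simulation is kept.
-- Both `while True` loops are ported with the same fuel bound `pvFuel` (returning 0 when
-- it runs out); the equivalence below is between these two fuelled ports.

-- ===== PORT A =====

/-- `int(c)` for a single character (Python raises ValueError on '-', which only occurs
    for negative `data`; `Pre_` excludes those, so the default 0 is never produced there). -/
def pyDigitVal (c : Char) : Int := (PySem.Int.ofChars? [c]).getD 0

/-- the inner `while check_idx + n <= board_len` loop of A: `.inl r` is `return r`,
    `.inr ci` is falling through with the final `check_idx = ci`. -/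
def scanA (board dat : List Int) (check_idx : Int) : Int ⊕ Int :=
  if h : check_idx + (dat.length : Int) ≤ (board.length : Int) then
    if PySem.List.slice board (some check_idx) (some (check_idx + (dat.length : Int))) = dat
    then Sum.inl check_idx
    else scanA board dat (check_idx + 1)
  else Sum.inr check_idx
termination_by ((board.length : Int) + 1 - check_idx).toNat
decreasing_by
  omega

/-- fuel for the `while True` loops of both ports (number of simulated rounds). -/
def pvFuel : Nat := 4294967296

/-- the `while True` loop of A.  `board[i]` is always read at an index in range
    (the elves' indices are reduced modulo the board length), so `.getD 0` is never
    the result of an out-of-range read. -/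
def loopA (dat : List Int) : Nat → Int → Int → List Int → Int → Int
  | 0, _, _, _, _ => 0
  | fuel+1, ca, cb, board, check_idx =>
    let new := (PySem.List.pyGet? board ca).getD 0 + (PySem.List.pyGet? board cb).getD 0
    let board' := board ++ (PySem.Int.toChars new).map pyDigitVal
    let ca' := PySem.Int.mod (ca + (PySem.List.pyGet? board' ca).getD 0 + 1) (board'.length : Int)
    let cb' := PySem.Int.mod (cb + (PySem.List.pyGet? board' cb).getD 0 + 1) (board'.length : Int)
    match scanA board' dat check_idx with
    | Sum.inl r => r
    | Sum.inr ci' => loopA dat fuel ca' cb' board' ci'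

def recipes_needed (data : Int) : Int :=
  loopA ((PySem.Int.toChars data).map pyDigitVal) pvFuel 0 1 [3, 7] 0

-- ===== PORT B =====

/-- the `for d in …` feeding loop of B: appends each digit to the board, updates the
    rolling window value, and returns `.inr (count - n)` on a hit. -/
def feedB (data M nI : Int) : List Int → List Int → Int → Int → (List Int × Int × Int) ⊕ Int
  | [], board, count, rolling => Sum.inl (board, count, rolling)
  | d :: ds, board, count, rolling =>
    let board' := board ++ [d]
    let rolling' := PySem.Int.mod (rolling * 10 + d) M
    let count' := count + 1
    if nI ≤ count' ∧ rolling' = data then Sum.inr (count' - nI)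
    else feedB data M nI ds board' count' rolling'

/-- the `while True` loop of B. -/
def loopB (data M nI : Int) : Nat → Int → Int → List Int → Int → Int → Int
  | 0, _, _, _, _, _ => 0
  | fuel+1, a, b, board, count, rolling =>
    let s := (PySem.List.pyGet? board a).getD 0 + (PySem.List.pyGet? board b).getD 0
    match feedB data M nI (if 10 ≤ s then [1, s - 10] else [s]) board count rolling with
    | Sum.inr r => r
    | Sum.inl (board', count', rolling') =>
      loopB data M nI fuel
        (PySem.Int.mod (a + (PySem.List.pyGet? board' a).getD 0 + 1) (board'.length : Int))
        (PySem.Int.mod (b + (PySem.List.pyGet? board' b).getD 0 + 1) (board'.length : Int))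
        board' count' rolling'

def recipes_needed_alt (data : Int) : Int :=
  let nI := PySem.Str.len (PySem.Int.toStr data)
  let M := (10:Int) ^ nI.toNat   -- 10 ** n with n = len(str(data)) ≥ 1 (exponent cast is exact)
  match feedB data M nI [3, 7] [] 0 0 with
  | Sum.inr r => r
  | Sum.inl (board, count, rolling) => loopB data M nI pvFuel 0 1 board count rolling

-- ===== PRECONDITION & SPEC =====

/-- On negative `data`, A raises ValueError (`int('-')` while digitising the pattern). -/
def Pre_recipes_needed (data : Int) : Prop := 0 ≤ data
instance (data : Int) : Decidable (Pre_recipes_needed data) := by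
  unfold Pre_recipes_needed; infer_instance

def pvWitness_recipes_needed : Int := 51

def Spec_recipes_needed (data : Int) (out : Int) : Prop := out = recipes_needed_alt data
instance (data : Int) (out : Int) : Decidable (Spec_recipes_needed data out) := by
  unfold Spec_recipes_needed; infer_instance

-- ===== CLAIM (what is proved, stated in full; the proofs are below) =====
def Claim_equal_recipes_needed : Prop :=
  ∀ (data : Int), Dom_recipes_needed data → Pre_recipes_needed data →
    Spec_recipes_needed data (recipes_needed data)

-- ===== LEMMAS AND PROOFS =====

/-- the value of a most-significant-first digit list. -/
def evalD (l : List Int) : Int := l.foldl (fun v d => v * 10 + d) 0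

/-- decimal digits of a natural number, most significant first (proof-side reference). -/
def digs (m : Nat) : List Int :=
  if m < 10 then [(m : Int)] else digs (m / 10) ++ [((m % 10 : Nat) : Int)]
termination_by m
decreasing_by exact Nat.div_lt_self (by omega) (by norm_num)

/-- no window of `B` (of the pattern's length) equals the pattern. -/
def Fail (dat B : List Int) : Prop :=
  ∀ j : Nat, j + dat.length ≤ B.length → (B.drop j).take dat.length ≠ dat

lemma foldl_shift (l : List Int) : ∀ v : Int,
    l.foldl (fun x d => x * 10 + d) v
      = v * 10 ^ l.length + l.foldl (fun x d => x * 10 + d) 0 := by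
  induction l with
  | nil => intro v; simp
  | cons d t ih =>
    intro v
    simp only [List.foldl_cons, List.length_cons]
    rw [ih (v * 10 + d), ih (0 * 10 + d)]
    ring

lemma evalD_cons (d : Int) (t : List Int) :
    evalD (d :: t) = d * 10 ^ t.length + evalD t := by
  simp only [evalD, List.foldl_cons]
  rw [foldl_shift t (0 * 10 + d)]
  ring

lemma evalD_append (x y : List Int) :
    evalD (x ++ y) = evalD x * 10 ^ y.length + evalD y := by
  simp only [evalD, List.foldl_append]
  rw [foldl_shift y (List.foldl (fun v d => v * 10 + d) 0 x)]

lemma evalD_append_singleton (x : List Int) (d : Int) :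
    evalD (x ++ [d]) = evalD x * 10 + d := by
  rw [evalD_append]; simp [evalD]

lemma evalD_bounds (l : List Int) (h : ∀ x ∈ l, 0 ≤ x ∧ x ≤ 9) :
    0 ≤ evalD l ∧ evalD l < 10 ^ l.length := by
  induction l with
  | nil => simp [evalD]
  | cons d t ih =>
    have hd := h d (by simp)
    have ht := ih (fun x hx => h x (by simp [hx]))
    have hp : (0:Int) < 10 ^ t.length := by positivity
    rw [evalD_cons]
    constructor
    · nlinarith
    · have : d * 10 ^ t.length ≤ 9 * 10 ^ t.length := by nlinarith
      calc d * 10 ^ t.length + evalD t < d * 10 ^ t.length + 10 ^ t.length := by omega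
        _ ≤ 10 * 10 ^ t.length := by nlinarith
        _ = 10 ^ (d :: t).length := by rw [List.length_cons]; ring

lemma evalD_inj : ∀ (xs ys : List Int), xs.length = ys.length →
    (∀ x ∈ xs, 0 ≤ x ∧ x ≤ 9) → (∀ x ∈ ys, 0 ≤ x ∧ x ≤ 9) →
    evalD xs = evalD ys → xs = ys := by
  intro xs
  induction xs with
  | nil => intro ys h _ _ _; cases ys with
    | nil => rfl
    | cons b t => simp at h
  | cons a xt ih =>
    intro ys hlen hx hy he
    cases ys with
    | nil => simp at hlen
    | cons b yt =>
      simp only [List.length_cons, Nat.add_right_cancel_iff] at hlen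
      rw [evalD_cons, evalD_cons, hlen] at he
      have hxt := evalD_bounds xt (fun x hx' => hx x (by simp [hx']))
      have hyt := evalD_bounds yt (fun x hx' => hy x (by simp [hx']))
      have ha := hx a (by simp)
      have hb := hy b (by simp)
      rw [hlen] at hxt
      have hp : (0:Int) < 10 ^ yt.length := by positivity
      have hab : a = b := by
        rcases lt_trichotomy a b with h | h | h
        · exfalso
          have : (a + 1) * 10 ^ yt.length ≤ b * 10 ^ yt.length := by
            apply mul_le_mul_of_nonneg_right (by omega) hp.le
          nlinarith
        · exact h
        · exfalso
          have : (b + 1) * 10 ^ yt.length ≤ a * 10 ^ yt.length := by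
            apply mul_le_mul_of_nonneg_right (by omega) hp.le
          nlinarith
      subst hab
      have hev : evalD xt = evalD yt := by
        have := he; omega
      rw [ih yt hlen (fun x hx' => hx x (by simp [hx']))
        (fun x hx' => hy x (by simp [hx'])) hev]

lemma pyDigitVal_digitChar (d : Nat) (h : d < 10) :
    pyDigitVal (Nat.digitChar d) = (d : Int) := by
  interval_cases d <;> rfl

lemma toDigitsCore_digs : ∀ (f m : Nat) (acc : List Char), m < f →
    (Nat.toDigitsCore 10 f m acc).map pyDigitVal = digs m ++ acc.map pyDigitVal := by
  intro f
  induction f with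
  | zero => intro m acc h; omega
  | succ f ih =>
    intro m acc h
    simp only [Nat.toDigitsCore]
    by_cases h10 : m / 10 = 0
    · have hm : m < 10 := by omega
      rw [if_pos h10, digs, if_pos hm]
      simp only [List.map_cons, List.cons_append, List.nil_append]
      rw [Nat.mod_eq_of_lt hm, pyDigitVal_digitChar m hm]
    · have hdiv : m / 10 < m := Nat.div_lt_self (by omega) (by norm_num)
      rw [if_neg h10, ih (m / 10) _ (by omega)]
      conv_rhs => rw [digs]
      rw [if_neg (by omega : ¬ m < 10), List.append_assoc]
      congr 1
      simp only [List.map_cons]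
      rw [pyDigitVal_digitChar (m % 10) (Nat.mod_lt _ (by norm_num))]
      rfl

lemma map_toChars_digs (m : Int) (h : 0 ≤ m) :
    (PySem.Int.toChars m).map pyDigitVal = digs m.toNat := by
  rw [PySem.Int.toChars]
  rw [if_neg (by omega)]
  rw [Nat.toDigits]
  rw [toDigitsCore_digs (m.toNat + 1) m.toNat [] (by omega)]
  simp

lemma digs_bounds : ∀ m : Nat, ∀ x ∈ digs m, 0 ≤ x ∧ x ≤ 9 := by
  intro m
  induction m using Nat.strong_induction_on with
  | _ m ih =>
    intro x hx
    rw [digs] at hx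
    by_cases h : m < 10
    · simp only [if_pos h, List.mem_singleton] at hx
      subst hx; omega
    · simp only [if_neg h, List.mem_append, List.mem_singleton] at hx
      rcases hx with hx | hx
      · exact ih (m / 10) (Nat.div_lt_self (by omega) (by norm_num)) x hx
      · subst hx
        have := Nat.mod_lt m (show 0 < 10 by norm_num)
        omega

lemma evalD_digs : ∀ m : Nat, evalD (digs m) = (m : Int) := by
  intro m
  induction m using Nat.strong_induction_on with
  | _ m ih =>
    rw [digs]
    by_cases h : m < 10
    · simp [if_pos h, evalD]
    · simp only [if_neg h]
      rw [evalD_append_singleton, ih (m / 10) (Nat.div_lt_self (by omega) (by norm_num))]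
      have := Nat.div_add_mod m 10
      push_cast
      omega

lemma digs_len_pos : ∀ m : Nat, 1 ≤ (digs m).length := by
  intro m
  rw [digs]
  by_cases h : m < 10
  · simp [if_pos h]
  · simp [if_neg h]

lemma digs_small (s : Nat) (h : s ≤ 18) :
    digs s = if 10 ≤ s then [1, (s : Int) - 10] else [(s : Int)] := by
  rw [digs]
  by_cases h10 : s < 10
  · rw [if_pos h10, if_neg (by omega)]
  · rw [if_neg h10, if_pos (by omega)]
    have h1 : s / 10 = 1 := by omega
    have h2 : s % 10 = s - 10 := by omega
    have hdigs1 : digs 1 = [1] := by rw [digs]; norm_num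
    rw [h1, h2, hdigs1]
    have hc : ((s - 10 : Nat) : Int) = (s : Int) - 10 := by omega
    rw [hc]
    rfl

lemma slice_eq_win (B : List Int) (s : Int) (n : Nat) (hs : 0 ≤ s) :
    PySem.List.slice B (some s) (some (s + (n : Int))) = (B.drop s.toNat).take n := by
  rw [PySem.List.slice_toNat B hs (by omega : (0:Int) ≤ s + (n:Int))]
  congr 1
  omega

lemma prefix_win (B rest : List Int) (j n : Nat) (h : j + n ≤ B.length) :
    ((B ++ rest).drop j).take n = (B.drop j).take n := by
  rw [List.drop_append_of_le_length (by omega)]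
  rw [List.take_append_of_le_length (by simp; omega)]

lemma getD_digit (B : List Int) (hB : ∀ x ∈ B, 0 ≤ x ∧ x ≤ 9) (i : Int) :
    0 ≤ (PySem.List.pyGet? B i).getD 0 ∧ (PySem.List.pyGet? B i).getD 0 ≤ 9 := by
  cases h : PySem.List.pyGet? B i with
  | none => simp
  | some v =>
    have hv : v ∈ B := PySem.List.mem_of_pyGet?_eq_some _ h
    simpa using hB v hv

lemma roll_step (v d M : Int) (hM : 0 < M) :
    PySem.Int.mod ((v % M) * 10 + d) M = (v * 10 + d) % M := by
  rw [PySem.Int.mod_eq_emod_of_pos hM]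
  conv_lhs => rw [Int.add_emod, Int.mul_emod, Int.emod_emod_of_dvd v dvd_rfl,
    ← Int.mul_emod, ← Int.add_emod]

lemma check_iff (data : Int) (dat B : List Int)
    (hdb : ∀ x ∈ dat, 0 ≤ x ∧ x ≤ 9) (hB : ∀ x ∈ B, 0 ≤ x ∧ x ≤ 9)
    (hde : evalD dat = data) :
    (((dat.length : Int) ≤ (B.length : Int)) ∧ evalD B % 10 ^ dat.length = data)
      ↔ (dat.length ≤ B.length ∧ B.drop (B.length - dat.length) = dat) := by
  constructor
  · rintro ⟨h1, h2⟩
    have hn : dat.length ≤ B.length := by exact_mod_cast h1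
    refine ⟨hn, ?_⟩
    set y := B.drop (B.length - dat.length) with hy
    have hylen : y.length = dat.length := by
      simp [hy]; omega
    have hsplit : B = B.take (B.length - dat.length) ++ y := (List.take_append_drop _ _).symm
    have hyb : ∀ x ∈ y, 0 ≤ x ∧ x ≤ 9 := fun x hx => hB x (List.mem_of_mem_drop hx)
    have hybd := evalD_bounds y hyb
    have hmod : evalD B % 10 ^ dat.length = evalD y := by
      conv_lhs => rw [hsplit]
      rw [evalD_append, hylen]
      rw [add_comm, mul_comm]
      rw [Int.add_mul_emod_self_left]
      exact Int.emod_eq_of_lt hybd.1 (hylen ▸ hybd.2)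
    rw [hmod] at h2
    exact evalD_inj y dat (by omega) hyb hdb (by rw [h2, hde])
  · rintro ⟨h1, h2⟩
    refine ⟨by exact_mod_cast h1, ?_⟩
    set y := B.drop (B.length - dat.length) with hy
    have hylen : y.length = dat.length := by
      simp [hy]; omega
    have hsplit : B = B.take (B.length - dat.length) ++ y := (List.take_append_drop _ _).symm
    have hyb : ∀ x ∈ y, 0 ≤ x ∧ x ≤ 9 := fun x hx => hB x (List.mem_of_mem_drop hx)
    have hybd := evalD_bounds y hyb
    conv_lhs => rw [hsplit]
    rw [evalD_append, hylen, add_comm, mul_comm, Int.add_mul_emod_self_left]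
    rw [Int.emod_eq_of_lt hybd.1 (hylen ▸ hybd.2), h2, hde]

lemma scan_stop (B dat : List Int) (ci : Int)
    (h : ¬ (ci + (dat.length : Int) ≤ (B.length : Int))) :
    scanA B dat ci = Sum.inr ci := by
  rw [scanA, dif_neg h]

lemma scan_hit (B dat : List Int) (ci : Int)
    (h1 : ci + (dat.length : Int) ≤ (B.length : Int))
    (h2 : PySem.List.slice B (some ci) (some (ci + (dat.length : Int))) = dat) :
    scanA B dat ci = Sum.inl ci := by
  rw [scanA, dif_pos h1, if_pos h2]

lemma scan_miss (B dat : List Int) (ci : Int)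
    (h1 : ci + (dat.length : Int) ≤ (B.length : Int))
    (h2 : ¬ (PySem.List.slice B (some ci) (some (ci + (dat.length : Int))) = dat)) :
    scanA B dat ci = scanA B dat (ci + 1) := by
  rw [scanA]
  rw [dif_pos h1, if_neg h2]

theorem scan_skip (B dat : List Int) (ci j : Int) (h0 : 0 ≤ ci) (hij : ci ≤ j)
    (hlen : j + (dat.length : Int) ≤ (B.length : Int))
    (hfail : ∀ s : Int, ci ≤ s → s < j →
      PySem.List.slice B (some s) (some (s + (dat.length : Int))) ≠ dat) :
    scanA B dat ci = scanA B dat j := by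
  by_cases hcj : ci = j
  · rw [hcj]
  · have hlt : ci < j := lt_of_le_of_ne hij hcj
    have hd : (0:Int) ≤ (dat.length : Int) := by positivity
    have h1 : ci + (dat.length : Int) ≤ (B.length : Int) := by omega
    rw [scan_miss B dat ci h1 (hfail ci le_rfl hlt)]
    exact scan_skip B dat (ci + 1) j (by omega) (by omega) hlen
      (fun s hs1 hs2 => hfail s (by omega) hs2)
termination_by (j - ci).toNat
decreasing_by omega

lemma scan_found (dat B1 rest : List Int) (ci : Int)
    (_hn : 1 ≤ dat.length)
    (hnle : dat.length ≤ B1.length)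
    (hmatch : B1.drop (B1.length - dat.length) = dat)
    (hfail : ∀ j : Nat, j + dat.length < B1.length → (B1.drop j).take dat.length ≠ dat)
    (h0 : 0 ≤ ci) (hci : ci ≤ (B1.length : Int) - (dat.length : Int)) :
    scanA (B1 ++ rest) dat ci = Sum.inl ((B1.length : Int) - (dat.length : Int)) := by
  set j : Int := (B1.length : Int) - (dat.length : Int) with hj
  have hj0 : 0 ≤ j := by omega
  have hskip : scanA (B1 ++ rest) dat ci = scanA (B1 ++ rest) dat j := by
    apply scan_skip _ _ _ _ h0 (by omega)
    · simp only [List.length_append]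
      push_cast
      omega
    · intro s hs1 hs2
      have hs0 : 0 ≤ s := by omega
      rw [slice_eq_win _ _ _ hs0]
      rw [prefix_win _ _ _ _ (by omega)]
      exact hfail s.toNat (by omega)
  rw [hskip]
  apply scan_hit
  · simp only [List.length_append]; push_cast; omega
  · rw [slice_eq_win _ _ _ hj0]
    rw [prefix_win _ _ _ _ (by omega)]
    have hjn : j.toNat = B1.length - dat.length := by omega
    rw [hjn, hmatch]
    exact List.take_of_length_le (by omega)

lemma scan_none (dat B : List Int) (ci : Int)
    (_hn : 1 ≤ dat.length)
    (h0 : 0 ≤ ci) (hci : ci ≤ max 0 ((B.length : Int) - (dat.length : Int) + 1))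
    (hfail : Fail dat B) :
    ∃ ci', scanA B dat ci = Sum.inr ci' ∧ 0 ≤ ci' ∧
      ci' ≤ max 0 ((B.length : Int) - (dat.length : Int) + 1) := by
  by_cases hc : ci + (dat.length : Int) ≤ (B.length : Int)
  · set j : Int := (B.length : Int) - (dat.length : Int) with hj
    have hskip : scanA B dat ci = scanA B dat j := by
      apply scan_skip _ _ _ _ h0 (by omega) (by omega)
      intro s hs1 hs2
      rw [slice_eq_win _ _ _ (by omega)]
      exact hfail s.toNat (by omega)
    rw [hskip]
    rw [scan_miss _ _ _ (by omega) (by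
      rw [slice_eq_win _ _ _ (by omega)]
      exact hfail j.toNat (by omega))]
    rw [scan_stop _ _ _ (by omega)]
    exact ⟨j + 1, rfl, by omega, by omega⟩
  · rw [scan_stop _ _ _ hc]
    exact ⟨ci, rfl, h0, hci⟩

lemma fail_snoc (dat B : List Int) (d : Int)
    (hfail : Fail dat B)
    (hnew : ¬ (dat.length ≤ B.length + 1 ∧ (B ++ [d]).drop (B.length + 1 - dat.length) = dat)) :
    Fail dat (B ++ [d]) := by
  intro j hjn
  simp only [List.length_append, List.length_cons, List.length_nil] at hjn
  by_cases hin : j + dat.length ≤ B.length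
  · rw [prefix_win _ _ _ _ hin]
    exact hfail j hin
  · have hj : j = B.length + 1 - dat.length := by omega
    intro hcon
    apply hnew
    refine ⟨by omega, ?_⟩
    have hdl : (B ++ [d]).drop j = dat := by
      rw [← hcon]
      exact (List.take_of_length_le (by simp; omega)).symm
    rw [← hj]
    exact hdl

lemma bounds_append (B C : List Int) (hB : ∀ x ∈ B, 0 ≤ x ∧ x ≤ 9)
    (hC : ∀ x ∈ C, 0 ≤ x ∧ x ≤ 9) : ∀ x ∈ B ++ C, 0 ≤ x ∧ x ≤ 9 := by
  intro x hx
  rcases List.mem_append.mp hx with h | h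
  · exact hB x h
  · exact hC x h

lemma feed_nil (data M nI : Int) (B : List Int) (count rolling : Int) :
    feedB data M nI [] B count rolling = Sum.inl (B, count, rolling) := rfl

lemma feed_step (data M nI d : Int) (ds B : List Int) (count rolling : Int) :
    feedB data M nI (d :: ds) B count rolling =
      if nI ≤ count + 1 ∧ PySem.Int.mod (rolling * 10 + d) M = data
      then Sum.inr (count + 1 - nI)
      else feedB data M nI ds (B ++ [d]) (count + 1) (PySem.Int.mod (rolling * 10 + d) M) := rfl

lemma cond_iff (data : Int) (dat B : List Int) (d : Int)
    (hdb : ∀ x ∈ dat, 0 ≤ x ∧ x ≤ 9) (hB : ∀ x ∈ B, 0 ≤ x ∧ x ≤ 9)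
    (hd0 : 0 ≤ d) (hd9 : d ≤ 9) (hde : evalD dat = data) :
    ((dat.length : Int) ≤ (B.length : Int) + 1 ∧
      PySem.Int.mod ((evalD B % 10 ^ dat.length) * 10 + d) (10 ^ dat.length) = data)
      ↔ (dat.length ≤ B.length + 1 ∧ (B ++ [d]).drop (B.length + 1 - dat.length) = dat) := by
  rw [roll_step _ _ _ (by positivity), ← evalD_append_singleton]
  have h := check_iff data dat (B ++ [d]) hdb
    (bounds_append B [d] hB (by intro x hx; simp at hx; omega)) hde
  simp only [List.length_append, List.length_singleton] at h
  push_cast at h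
  exact h

lemma loopA_one (dat : List Int) (fuel : Nat) (ca cb : Int) (board : List Int) (ci r : Int)
    (h : scanA (board ++ (PySem.Int.toChars ((PySem.List.pyGet? board ca).getD 0
        + (PySem.List.pyGet? board cb).getD 0)).map pyDigitVal) dat ci = Sum.inl r) :
    loopA dat (fuel + 1) ca cb board ci = r := by
  simp only [loopA]
  rw [h]

lemma loop_eq (data : Int) (dat : List Int)
    (hdb : ∀ x ∈ dat, 0 ≤ x ∧ x ≤ 9) (hde : evalD dat = data) (hdn : 1 ≤ dat.length) :
    ∀ (fuel : Nat) (ca cb ci : Int) (board : List Int),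
    (∀ x ∈ board, 0 ≤ x ∧ x ≤ 9) → 0 ≤ ci →
    ci ≤ max 0 ((board.length : Int) - (dat.length : Int) + 1) →
    Fail dat board →
    loopA dat fuel ca cb board ci
      = loopB data ((10:Int) ^ dat.length) ((dat.length : Int)) fuel ca cb board
          ((board.length : Int)) (evalD board % 10 ^ dat.length) := by
  intro fuel
  induction fuel with
  | zero => intro ca cb ci board _ _ _ _; rfl
  | succ fuel ih =>
    intro ca cb ci board hb h0 hci hfail
    have hMpos : (0:Int) < 10 ^ dat.length := by positivity
    simp only [loopA, loopB]
    have hca := getD_digit board hb ca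
    have hcb := getD_digit board hb cb
    set s : Int := (PySem.List.pyGet? board ca).getD 0 + (PySem.List.pyGet? board cb).getD 0
      with hs
    have hs0 : 0 ≤ s := by omega
    have hs18 : s ≤ 18 := by omega
    have hds : (PySem.Int.toChars s).map pyDigitVal = (if 10 ≤ s then [1, s - 10] else [s]) := by
      rw [map_toChars_digs s hs0, digs_small s.toNat (by omega)]
      rcases le_or_gt 10 s with h | h
      · rw [if_pos (by omega : 10 ≤ s.toNat), if_pos h, Int.toNat_of_nonneg hs0]
      · rw [if_neg (by omega : ¬ 10 ≤ s.toNat), if_neg (by omega : ¬ (10:Int) ≤ s),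
          Int.toNat_of_nonneg hs0]
    rw [hds]
    by_cases h10 : (10:Int) ≤ s
    · rw [if_pos h10]
      have hlen1n : (board ++ [1]).length = board.length + 1 := by simp
      rw [show board ++ [1, s - 10] = (board ++ [1]) ++ [s - 10] by simp]
      rw [feed_step]
      by_cases hC1 : dat.length ≤ board.length + 1 ∧
          (board ++ [1]).drop (board.length + 1 - dat.length) = dat
      · rw [if_pos ((cond_iff data dat board 1 hdb hb (by norm_num) (by norm_num) hde).mpr hC1)]
        have hscan : scanA ((board ++ [1]) ++ [s - 10]) dat ci
            = Sum.inl ((board.length : Int) + 1 - (dat.length : Int)) := by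
          have h := scan_found dat (board ++ [1]) [s - 10] ci hdn
            (by simp only [List.length_append, List.length_singleton]; omega)
            (by simpa only [List.length_append, List.length_singleton] using hC1.2)
            (by
              intro j hj
              simp only [List.length_append, List.length_singleton] at hj
              rw [prefix_win _ _ _ _ (by omega)]
              exact hfail j (by omega))
            h0
            (by simp only [List.length_append, List.length_singleton]; push_cast; omega)
          rw [h]
          congr 1
          simp only [List.length_append, List.length_singleton]
          push_cast
          ring
        rw [hscan]
      · rw [if_neg ((not_congr
          (cond_iff data dat board 1 hdb hb (by norm_num) (by norm_num) hde)).mpr hC1)]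
        have hroll1 : PySem.Int.mod ((evalD board % 10 ^ dat.length) * 10 + 1) (10 ^ dat.length)
            = evalD (board ++ [1]) % 10 ^ dat.length := by
          rw [roll_step _ _ _ hMpos, ← evalD_append_singleton]
        rw [hroll1]
        have hb1 : ∀ x ∈ board ++ [1], 0 ≤ x ∧ x ≤ 9 :=
          bounds_append board [1] hb (by intro x hx; simp at hx; omega)
        have hfail1 : Fail dat (board ++ [1]) := fail_snoc dat board 1 hfail hC1
        have hcnt1 : ((board.length : Int) + 1) = ((board ++ [1]).length : Int) := by
          simp only [List.length_append, List.length_singleton, Nat.cast_add, Nat.cast_one]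
        rw [hcnt1]
        rw [feed_step]
        by_cases hC2 : dat.length ≤ (board ++ [1]).length + 1 ∧
            ((board ++ [1]) ++ [s - 10]).drop ((board ++ [1]).length + 1 - dat.length) = dat
        · rw [if_pos ((cond_iff data dat (board ++ [1]) (s - 10) hdb hb1
            (by omega) (by omega) hde).mpr hC2)]
          have hscan : scanA ((board ++ [1]) ++ [s - 10]) dat ci
              = Sum.inl (((board ++ [1]).length : Int) + 1 - (dat.length : Int)) := by
            have h := scan_found dat ((board ++ [1]) ++ [s - 10]) [] ci hdn
              (by simp only [List.length_append, List.length_singleton]; omega)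
              (by simpa only [List.length_append, List.length_singleton] using hC2.2)
              (by
                intro j hj
                simp only [List.length_append, List.length_singleton] at hj
                by_cases hjin : j + dat.length ≤ board.length
                · rw [prefix_win _ _ _ _
                    (by simp only [List.length_append, List.length_singleton]; omega)]
                  rw [prefix_win _ _ _ _ hjin]
                  exact hfail j hjin
                · rw [prefix_win _ _ _ _
                    (by simp only [List.length_append, List.length_singleton]; omega)]
                  exact hfail1 j
                    (by simp only [List.length_append, List.length_singleton]; omega))
              h0
              (by simp only [List.length_append, List.length_singleton]; push_cast; omega)
            rw [List.append_nil] at h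
            rw [h]
            congr 1
            simp only [List.length_append, List.length_singleton]
            push_cast
            ring
          rw [hscan]
        · rw [if_neg ((not_congr (cond_iff data dat (board ++ [1]) (s - 10) hdb hb1
            (by omega) (by omega) hde)).mpr hC2)]
          rw [feed_nil]
          have hroll2 : PySem.Int.mod
              ((evalD (board ++ [1]) % 10 ^ dat.length) * 10 + (s - 10)) (10 ^ dat.length)
              = evalD ((board ++ [1]) ++ [s - 10]) % 10 ^ dat.length := by
            rw [roll_step _ _ _ hMpos, ← evalD_append_singleton]
          rw [hroll2]
          have hcnt2 : (((board ++ [1]).length : Int) + 1)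
              = (((board ++ [1]) ++ [s - 10]).length : Int) := by
            simp only [List.length_append, List.length_singleton, Nat.cast_add, Nat.cast_one]
          rw [hcnt2]
          have hb2 : ∀ x ∈ (board ++ [1]) ++ [s - 10], 0 ≤ x ∧ x ≤ 9 :=
            bounds_append _ [s - 10] hb1 (by intro x hx; simp at hx; omega)
          have hfail2 : Fail dat ((board ++ [1]) ++ [s - 10]) :=
            fail_snoc dat _ _ hfail1 hC2
          obtain ⟨ci', hscan, hci'0, hci'b⟩ := scan_none dat ((board ++ [1]) ++ [s - 10]) ci hdn h0
            (by
              simp only [List.length_append, List.length_singleton]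
              push_cast
              omega) hfail2
          rw [hscan]
          exact ih _ _ ci' _ hb2 hci'0 hci'b hfail2
    · rw [if_neg h10]
      rw [feed_step]
      by_cases hC : dat.length ≤ board.length + 1 ∧
          (board ++ [s]).drop (board.length + 1 - dat.length) = dat
      · rw [if_pos ((cond_iff data dat board s hdb hb hs0 (by omega) hde).mpr hC)]
        have hscan : scanA (board ++ [s]) dat ci
            = Sum.inl ((board.length : Int) + 1 - (dat.length : Int)) := by
          have h := scan_found dat (board ++ [s]) [] ci hdn
            (by simp only [List.length_append, List.length_singleton]; omega)
            (by simpa only [List.length_append, List.length_singleton] using hC.2)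
            (by
              intro j hj
              simp only [List.length_append, List.length_singleton] at hj
              rw [prefix_win _ _ _ _ (by omega)]
              exact hfail j (by omega))
            h0
            (by simp only [List.length_append, List.length_singleton]; push_cast; omega)
          rw [List.append_nil] at h
          rw [h]
          congr 1
          simp only [List.length_append, List.length_singleton]
          push_cast
          ring
        rw [hscan]
      · rw [if_neg ((not_congr (cond_iff data dat board s hdb hb hs0 (by omega) hde)).mpr hC)]
        rw [feed_nil]
        have hroll : PySem.Int.mod ((evalD board % 10 ^ dat.length) * 10 + s) (10 ^ dat.length)
            = evalD (board ++ [s]) % 10 ^ dat.length := by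
          rw [roll_step _ _ _ hMpos, ← evalD_append_singleton]
        rw [hroll]
        have hcnt1 : ((board.length : Int) + 1) = ((board ++ [s]).length : Int) := by
          simp only [List.length_append, List.length_singleton, Nat.cast_add, Nat.cast_one]
        rw [hcnt1]
        have hb1 : ∀ x ∈ board ++ [s], 0 ≤ x ∧ x ≤ 9 :=
          bounds_append board [s] hb (by intro x hx; simp at hx; omega)
        have hfail1 : Fail dat (board ++ [s]) := fail_snoc dat board s hfail hC
        obtain ⟨ci', hscan, hci'0, hci'b⟩ := scan_none dat (board ++ [s]) ci hdn h0
          (by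
            simp only [List.length_append, List.length_singleton]
            push_cast
            omega) hfail1
        rw [hscan]
        exact ih _ _ ci' _ hb1 hci'0 hci'b hfail1

theorem recipes_needed_spec : Claim_equal_recipes_needed := by
  unfold Claim_equal_recipes_needed
  intro data hdom hpre
  unfold Spec_recipes_needed
  unfold Pre_recipes_needed at hpre
  obtain ⟨dat, hdat⟩ : ∃ l, (PySem.Int.toChars data).map pyDigitVal = l := ⟨_, rfl⟩
  have hdigs : digs data.toNat = dat := by rw [← hdat, map_toChars_digs data hpre]
  have hdb : ∀ x ∈ dat, 0 ≤ x ∧ x ≤ 9 := by rw [← hdigs]; exact digs_bounds _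
  have hde : evalD dat = data := by rw [← hdigs, evalD_digs, Int.toNat_of_nonneg hpre]
  have hdn : 1 ≤ dat.length := by rw [← hdigs]; exact digs_len_pos _
  have hMpos : (0:Int) < (10:Int) ^ dat.length := by positivity
  have hnI : PySem.Str.len (PySem.Int.toStr data) = (dat.length : Int) := by
    rw [PySem.Str.len_eq, PySem.Int.toList_toStr, ← hdat, List.length_map]
  simp only [recipes_needed, recipes_needed_alt]
  rw [hdat, hnI]
  simp only [Int.toNat_natCast]
  -- first initial digit (3)
  have hP1iff : ((dat.length : Int) ≤ 0 + 1 ∧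
      PySem.Int.mod (0 * 10 + 3) ((10:Int) ^ dat.length) = data)
      ↔ (dat.length ≤ 1 ∧ ([3] : List Int).drop (1 - dat.length) = dat) := by
    have h := cond_iff data dat [] 3 hdb (by simp) (by norm_num) (by norm_num) hde
    simpa [evalD] using h
  rw [feed_step]
  by_cases hD1 : dat.length ≤ 1 ∧ ([3] : List Int).drop (1 - dat.length) = dat
  · rw [if_pos (hP1iff.mpr hD1)]
    have hscan : scanA ([3] ++ [7, 1, 0]) dat 0 = Sum.inl ((0:Int) + 1 - (dat.length : Int)) := by
      have h := scan_found dat [3] [7, 1, 0] 0 hdn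
        (by simpa using hD1.1)
        (by simpa using hD1.2)
        (by intro j hj hcon; have h1 : ([3] : List Int).length = 1 := rfl; omega)
        le_rfl
        (by simp; omega)
      rw [h]
      congr 1
    rw [show pvFuel = 4294967295 + 1 from by norm_num [pvFuel]]
    exact loopA_one dat 4294967295 0 1 [3, 7] 0 _ (by
      rw [show (PySem.List.pyGet? ([3, 7] : List Int) 0).getD 0
          + (PySem.List.pyGet? ([3, 7] : List Int) 1).getD 0 = (10:Int) from by decide]
      rw [show (PySem.Int.toChars (10:Int)).map pyDigitVal = [1, 0] from by decide]
      rw [show ([3, 7] : List Int) ++ [1, 0] = [3] ++ [7, 1, 0] from by decide]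
      exact hscan)
  · rw [if_neg ((not_congr hP1iff).mpr hD1)]
    have hr1 : PySem.Int.mod ((0:Int) * 10 + 3) ((10:Int) ^ dat.length)
        = evalD [3] % 10 ^ dat.length := by
      rw [PySem.Int.mod_eq_emod_of_pos hMpos]
      norm_num [evalD]
    rw [hr1]
    rw [show ((0:Int) + 1) = (([3] : List Int).length : Int) from by simp]
    rw [show ([] : List Int) ++ [3] = [3] from rfl]
    -- second initial digit (7)
    have hP2iff := cond_iff data dat [3] 7 hdb
      (by intro x hx; simp at hx; omega) (by norm_num) (by norm_num) hde
    rw [feed_step]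
    by_cases hD2 : dat.length ≤ ([3] : List Int).length + 1 ∧
        (([3] : List Int) ++ [7]).drop (([3] : List Int).length + 1 - dat.length) = dat
    · rw [if_pos (hP2iff.mpr hD2)]
      have hn2 : dat.length ≤ 2 := by have := hD2.1; simpa using this
      have hscan : scanA (([3, 7] : List Int) ++ [1, 0]) dat 0
          = Sum.inl ((([3] : List Int).length : Int) + 1 - (dat.length : Int)) := by
        have h := scan_found dat [3, 7] [1, 0] 0 hdn
          (by simpa using hD2.1)
          (by simpa using hD2.2)
          (by
            intro j hj hcon
            simp only [List.length_cons, List.length_nil] at hj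
            have hj0 : j = 0 := by omega
            have hn1 : dat.length = 1 := by omega
            subst hj0
            rw [hn1] at hcon
            rw [show List.take 1 (List.drop 0 ([3, 7] : List Int)) = [3] from by decide] at hcon
            exact hD1 ⟨by omega, by rw [hn1]; simpa using hcon⟩)
          le_rfl
          (by simp; omega)
        rw [h]
        congr 1
      rw [show pvFuel = 4294967295 + 1 from by norm_num [pvFuel]]
      exact loopA_one dat 4294967295 0 1 [3, 7] 0 _ (by
        rw [show (PySem.List.pyGet? ([3, 7] : List Int) 0).getD 0
            + (PySem.List.pyGet? ([3, 7] : List Int) 1).getD 0 = (10:Int) from by decide]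
        rw [show (PySem.Int.toChars (10:Int)).map pyDigitVal = [1, 0] from by decide]
        exact hscan)
    · rw [if_neg ((not_congr hP2iff).mpr hD2)]
      have hr2 : PySem.Int.mod ((evalD [3] % 10 ^ dat.length) * 10 + 7) ((10:Int) ^ dat.length)
          = evalD [3, 7] % 10 ^ dat.length := by
        rw [roll_step _ _ _ hMpos, ← evalD_append_singleton]
        rfl
      rw [hr2]
      rw [show (([3] : List Int).length : Int) + 1 = (([3, 7] : List Int).length : Int) from by simp]
      rw [show ([3] : List Int) ++ [7] = [3, 7] from rfl]
      rw [feed_nil]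
      have hfail : Fail dat [3, 7] := by
        intro j hjn hcon
        simp only [List.length_cons, List.length_nil] at hjn
        rcases (by omega : j = 0 ∧ dat.length = 1 ∨ j = 0 ∧ dat.length = 2 ∨ j = 1 ∧ dat.length = 1)
          with ⟨hj, hn⟩ | ⟨hj, hn⟩ | ⟨hj, hn⟩ <;> subst hj <;> rw [hn] at hcon
        · rw [show List.take 1 (List.drop 0 ([3, 7] : List Int)) = [3] from by decide] at hcon
          exact hD1 ⟨by omega, by rw [hn]; simpa using hcon⟩
        · rw [show List.take 2 (List.drop 0 ([3, 7] : List Int)) = [3, 7] from by decide] at hcon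
          exact hD2 ⟨by simp [hn], by rw [hn]; simpa using hcon⟩
        · rw [show List.take 1 (List.drop 1 ([3, 7] : List Int)) = [7] from by decide] at hcon
          exact hD2 ⟨by simp [hn], by rw [hn]; simpa using hcon⟩
      exact loop_eq data dat hdb hde hdn pvFuel 0 1 0 [3, 7] (by decide) le_rfl
        (le_max_left _ _) hfail
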